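-- pv_equiv track=rewrite | github.com/Men-cotton/qec-project | NN-based/graphqec-paper/graphqec/decoder/_concatmatching.py | find_largest_indices
-- ===== SOURCE A (Python) =====
-- from typing import Any, Dict, List, Optional, Sequence, Tuple, Union
--
-- def find_largest_indices(nums: Sequence[int]) -> Tuple[int, int]:
--     if len(nums) < 2:
--         raise ValueError("List must contain at least two elements.")
--
--     # Find the max value and its indices
--     max_val = max(nums)
--     max_indices = [i for i, x in enumerate(nums) if x == max_val]
--
--     if len(max_indices) >= 2:
--         # Canonical choice: pick the first two indices in max_indices
--         return max_indices[0], max_indices[1]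
--     else:
--         # Find the second-largest value and its indices
--         second_max_val = max([x for x in nums if x != max_val])
--         second_max_indices = [i for i, x in enumerate(nums) if x == second_max_val]
--         # Canonical choice: pick the first index in second_max_indices
--         return max_indices[0], second_max_indices[0]
-- ===== SOURCE B (Python) =====
-- def find_largest_indices(nums):
--     if len(nums) < 2:
--         raise ValueError("List must contain at least two elements.")
--     if nums[0] >= nums[1]:
--         bi, bv, si, sv = 0, nums[0], 1, nums[1]
--     else:
--         bi, bv, si, sv = 1, nums[1], 0, nums[0]
--     for i, x in enumerate(nums[2:], 2):
--         if x > bv: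
--             si, sv, bi, bv = bi, bv, i, x
--         elif x > sv:
--             si, sv = i, x
--     return bi, si
-- ===== Notes on version B (the rewrite author's own statement) =====
-- stated objective: faster
-- what changed: Replaces A's multiple passes (max, index comprehension, filtered second max, second index comprehension) by one forward scan tracking the best and second-best index/value pairs with A's first-occurrence tie-breaking.
import Mathlib
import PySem

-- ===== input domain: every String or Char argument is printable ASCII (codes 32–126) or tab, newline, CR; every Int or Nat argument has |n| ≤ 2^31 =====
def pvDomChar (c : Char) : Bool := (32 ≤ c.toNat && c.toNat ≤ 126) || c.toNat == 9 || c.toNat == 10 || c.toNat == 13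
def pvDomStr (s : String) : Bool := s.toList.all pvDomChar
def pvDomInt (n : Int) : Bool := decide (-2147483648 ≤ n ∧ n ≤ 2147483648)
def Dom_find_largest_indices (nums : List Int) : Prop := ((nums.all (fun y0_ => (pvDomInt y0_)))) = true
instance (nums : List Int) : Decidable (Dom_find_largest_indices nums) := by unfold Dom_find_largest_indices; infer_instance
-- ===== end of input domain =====

-- B replaces A's several passes (max, index comprehension, filtered second max, second index
-- comprehension) by one forward scan tracking best/second-best index-value pairs (same tie-breaking).

-- ===== PORT A =====
-- helper for A's comprehension '[i for i, x in enumerate(nums) if x == v]'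
def maxIdxs (xs : List Int) (s : Int) (v : Int) : List Int :=
  (PySem.List.enumerate xs s).filterMap (fun p => if p.2 = v then some p.1 else none)

def find_largest_indices (nums : List Int) : Int × Int :=
  if nums.length < 2 then (0, 0)  -- Python raises ValueError here; excluded by Pre_
  else
    let max_val := (PySem.List.max? nums (fun x => x)).getD 0
    let max_indices := maxIdxs nums 0 max_val
    if 2 ≤ max_indices.length then
      ((max_indices[0]?).getD 0, (max_indices[1]?).getD 0)
    else
      let second_max_val := (PySem.List.max? (nums.filter (fun x => x ≠ max_val)) (fun x => x)).getD 0
      let second_max_indices := maxIdxs nums 0 second_max_val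
      ((max_indices[0]?).getD 0, (second_max_indices[0]?).getD 0)

-- ===== PORT B =====
-- the loop body of Source B: state is ((bi, bv), (si, sv)), p is (i, x)
def altStep (s : (Int × Int) × (Int × Int)) (p : Int × Int) : (Int × Int) × (Int × Int) :=
  if p.2 > s.1.2 then ((p.1, p.2), s.1)
  else if p.2 > s.2.2 then (s.1, (p.1, p.2))
  else s

def find_largest_indices_alt (nums : List Int) : Int × Int :=
  if nums.length < 2 then (0, 0)  -- Python raises ValueError here; excluded by Pre_
  else
    let n0 := (PySem.List.pyGet? nums 0).getD 0
    let n1 := (PySem.List.pyGet? nums 1).getD 0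
    let init := if n0 ≥ n1 then (((0 : Int), n0), ((1 : Int), n1)) else (((1 : Int), n1), ((0 : Int), n0))
    let fin := (PySem.List.enumerate (PySem.List.slice nums (some 2) none) 2).foldl altStep init
    (fin.1.1, fin.2.1)

-- ===== PRECONDITION & SPEC =====
-- A raises ValueError on lists with fewer than two elements.
def Pre_find_largest_indices (nums : List Int) : Prop := 2 ≤ nums.length
instance (nums : List Int) : Decidable (Pre_find_largest_indices nums) := by
  unfold Pre_find_largest_indices; infer_instance

def pvWitness_find_largest_indices : List Int := [0, 1]

def Spec_find_largest_indices (nums : List Int) (out : Int × Int) : Prop := out = find_largest_indices_alt nums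
instance (nums : List Int) (out : Int × Int) : Decidable (Spec_find_largest_indices nums out) := by unfold Spec_find_largest_indices; infer_instance

-- ===== CLAIM (what is proved, stated in full; the proofs are below) =====
def Claim_equal_find_largest_indices : Prop := ∀ (nums : List Int), Dom_find_largest_indices nums → Pre_find_largest_indices nums → Spec_find_largest_indices nums (find_largest_indices nums)

-- ===== LEMMAS AND PROOFS =====

-- Loop invariant of Source B after having processed the first n elements of l.
def LoopInv (l : List Int) (n : Nat) (s : (Int × Int) × (Int × Int)) : Prop :=
  ∃ bi si : Nat, bi < n ∧ si < n ∧ n ≤ l.length ∧ bi ≠ si ∧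
    s = (((bi : Int), l.getD bi 0), ((si : Int), l.getD si 0)) ∧
    (∀ j, j < n → l.getD j 0 ≤ l.getD bi 0) ∧
    (∀ j, j < bi → l.getD j 0 < l.getD bi 0) ∧
    (∀ j, j < n → j ≠ bi → l.getD j 0 ≤ l.getD si 0) ∧
    (∀ j, j < si → j ≠ bi → l.getD j 0 < l.getD si 0)

lemma maxIdxs_cons (x : Int) (xs : List Int) (s v : Int) :
    maxIdxs (x :: xs) s v =
      if x = v then s :: maxIdxs xs (s + 1) v else maxIdxs xs (s + 1) v := by
  by_cases h : x = v <;> simp [maxIdxs, PySem.List.enumerate_cons, h]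

lemma maxIdxs_head (xs : List Int) : ∀ (bi : Nat) (s v : Int), bi < xs.length →
    xs.getD bi 0 = v → (∀ j, j < bi → xs.getD j 0 ≠ v) →
    maxIdxs xs s v = (s + (bi : Int)) :: maxIdxs (xs.drop (bi + 1)) (s + (bi : Int) + 1) v := by
  induction xs with
  | nil => intro bi s v h; simp at h
  | cons x xs ih =>
    intro bi s v hlt hv hne
    cases bi with
    | zero =>
      simp only [List.getD_cons_zero] at hv
      simp [maxIdxs_cons, hv]
    | succ k =>
      have hx : x ≠ v := by
        have := hne 0 (Nat.succ_pos k); simpa using this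
      rw [maxIdxs_cons, if_neg hx,
        ih k (s + 1) v (by simpa using hlt) (by simpa using hv)
          (fun j hj => by simpa using hne (j + 1) (by omega))]
      congr 1 <;> [skip; congr 1] <;> push_cast <;> ring

lemma maxIdxs_nil_of_ne (xs : List Int) : ∀ (s v : Int),
    (∀ j, j < xs.length → xs.getD j 0 ≠ v) → maxIdxs xs s v = [] := by
  induction xs with
  | nil => intro s v _; rfl
  | cons x xs ih =>
    intro s v h
    have hx : x ≠ v := by have := h 0 (by simp); simpa using this
    rw [maxIdxs_cons, if_neg hx]
    exact ih (s + 1) v (fun j hj => by simpa using h (j + 1) (by simpa using Nat.succ_lt_succ hj))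

lemma getD_drop (l : List Int) (n k : Nat) (h : n + k < l.length) :
    (l.drop n).getD k 0 = l.getD (n + k) 0 := by
  rw [List.getD_eq_getElem _ _ (by simp; omega), List.getD_eq_getElem _ _ h]
  simp

lemma inv_step (l : List Int) (n : Nat) (s : (Int × Int) × (Int × Int)) (x : Int)
    (hd : l.getD n 0 = x) (hn : n < l.length) (hinv : LoopInv l n s) :
    LoopInv l (n + 1) (altStep s ((n : Int), x)) := by
  subst hd
  obtain ⟨bi, si, hbi, hsi, hnl, hne, hs, h1, h2, h3, h4⟩ := hinv
  subst hs
  by_cases hb : l.getD n 0 > l.getD bi 0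
  · refine ⟨n, bi, by omega, by omega, by omega, by omega, ?_, ?_, ?_, ?_, ?_⟩
    · simp only [altStep]
      rw [if_pos hb]
    · intro j hj
      rcases Nat.lt_or_ge j n with h | h
      · exact le_trans (h1 j h) (le_of_lt hb)
      · have : j = n := by omega
        subst this; omega
    · intro j hj; exact lt_of_le_of_lt (h1 j hj) hb
    · intro j hj hjn
      have : j < n := by omega
      exact h1 j this
    · intro j hj hjn; exact h2 j hj
  · by_cases hs2 : l.getD n 0 > l.getD si 0
    · refine ⟨bi, n, by omega, by omega, by omega, by omega, ?_, ?_, ?_, ?_, ?_⟩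
      · simp only [altStep]
        rw [if_neg hb, if_pos hs2]
      · intro j hj
        rcases Nat.lt_or_ge j n with h | h
        · exact h1 j h
        · have : j = n := by omega
          subst this; omega
      · exact h2
      · intro j hj hjb
        rcases Nat.lt_or_ge j n with h | h
        · exact le_trans (h3 j h hjb) (le_of_lt hs2)
        · have : j = n := by omega
          subst this; omega
      · intro j hj hjb
        have : j < n := by omega
        exact lt_of_le_of_lt (h3 j this hjb) hs2
    · refine ⟨bi, si, by omega, by omega, by omega, hne, ?_, ?_, h2, ?_, h4⟩
      · simp only [altStep]
        rw [if_neg hb, if_neg hs2]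
      · intro j hj
        rcases Nat.lt_or_ge j n with h | h
        · exact h1 j h
        · have : j = n := by omega
          subst this; omega
      · intro j hj hjb
        rcases Nat.lt_or_ge j n with h | h
        · exact h3 j h hjb
        · have : j = n := by omega
          subst this; omega

lemma fold_inv (l : List Int) : ∀ (t : List Int) (n : Nat) (s : (Int × Int) × (Int × Int)),
    l.drop n = t → LoopInv l n s →
    LoopInv l l.length ((PySem.List.enumerate t (n : Int)).foldl altStep s) := by
  intro t
  induction t with
  | nil =>
    intro n s hdrop hinv
    have hlen : l.length ≤ n := by
      have h := congrArg List.length hdrop; simp at h; omega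
    obtain ⟨bi, si, c1, c2, c3, c4, c5, c6, c7, c8, c9⟩ := hinv
    have hn : n = l.length := by omega
    subst hn
    exact ⟨bi, si, c1, c2, c3, c4, c5, c6, c7, c8, c9⟩
  | cons x t ih =>
    intro n s hdrop hinv
    have hn : n < l.length := by
      by_contra h
      rw [List.drop_eq_nil_of_le (by omega)] at hdrop
      exact absurd hdrop (by simp)
    have hx : l.getD n 0 = x := by
      have h0 := getD_drop l n 0 (by omega)
      rw [hdrop] at h0
      simpa using h0.symm
    have hdrop' : l.drop (n + 1) = t := by
      have : (l.drop n).drop 1 = t := by rw [hdrop]; rfl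
      rwa [List.drop_drop] at this
    rw [PySem.List.enumerate_cons, List.foldl_cons]
    have h := ih (n + 1) (altStep s ((n : Int), x)) hdrop' (inv_step l n s x hx hn hinv)
    rwa [show ((n + 1 : Nat) : Int) = (n : Int) + 1 by push_cast; ring] at h

lemma mem_getD (l : List Int) (y : Int) (h : y ∈ l) : ∃ j, j < l.length ∧ l.getD j 0 = y := by
  obtain ⟨j, hj, hy⟩ := List.mem_iff_getElem.mp h
  exact ⟨j, hj, by rw [List.getD_eq_getElem _ _ hj, hy]⟩

lemma getD_mem (l : List Int) (j : Nat) (h : j < l.length) : l.getD j 0 ∈ l := by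
  rw [List.getD_eq_getElem _ _ h]; exact List.getElem_mem h

-- the characterisation of A's result from the invariant at the end of the list
lemma A_char (l : List Int) (s : (Int × Int) × (Int × Int))
    (hlen : 2 ≤ l.length) (hinv : LoopInv l l.length s) :
    find_largest_indices l = (s.1.1, s.2.1) := by
  obtain ⟨bi, si, hbi, hsi, _, hne, hs, h1, h2, h3, h4⟩ := hinv
  subst hs
  have hnil : l ≠ [] := by intro h; subst h; simp at hlen
  -- max? computes l.getD bi 0
  have hmax : PySem.List.max? l (fun x => x) = some (l.getD bi 0) := by
    cases h : PySem.List.max? l (fun x => x) with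
    | none => exact absurd ((PySem.List.max?_eq_none_iff l _).mp h) hnil
    | some m =>
      have hm1 : m ∈ l := PySem.List.max?_mem h
      obtain ⟨j, hj, hjm⟩ := mem_getD l m hm1
      have hle : m ≤ l.getD bi 0 := hjm ▸ h1 j hj
      have hge : l.getD bi 0 ≤ m := PySem.List.max?_isMax h _ (getD_mem l bi hbi)
      rw [le_antisymm hle hge]
  have hhead : ∀ j, j < bi → l.getD j 0 ≠ l.getD bi 0 := fun j hj => ne_of_lt (h2 j hj)
  have hmi := maxIdxs_head l bi 0 (l.getD bi 0) hbi rfl hhead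
  rw [zero_add] at hmi
  simp only [find_largest_indices, if_neg (by omega : ¬ l.length < 2), hmax, Option.getD_some]
  by_cases hdup : l.getD si 0 = l.getD bi 0
  · -- the max occurs (at least) twice: si is its second occurrence
    have hbisi : bi < si := by
      rcases Nat.lt_or_ge si bi with h | h
      · exact absurd hdup (ne_of_lt (h2 si h))
      · omega
    have htail := maxIdxs_head (l.drop (bi + 1)) (si - bi - 1) ((bi : Int) + 1) (l.getD bi 0)
      (by simp; omega)
      (by rw [getD_drop l (bi + 1) (si - bi - 1) (by omega)]
          have : bi + 1 + (si - bi - 1) = si := by omega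
          rw [this, hdup])
      (by intro j hj
          rw [getD_drop l (bi + 1) j (by omega)]
          exact fun h => absurd h (ne_of_lt (hdup ▸ h4 (bi + 1 + j) (by omega) (by omega))))
    rw [htail] at hmi
    have hcast : (bi : Int) + 1 + ((si - bi - 1 : Nat) : Int) = (si : Int) := by omega
    rw [hcast] at hmi
    rw [hmi]
    simp
  · -- the max is unique: si is the first index of the second-largest value
    have hlt : l.getD si 0 < l.getD bi 0 := lt_of_le_of_ne (h1 si hsi) hdup
    have htail : maxIdxs (l.drop (bi + 1)) ((bi : Int) + 1) (l.getD bi 0) = [] := by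
      apply maxIdxs_nil_of_ne
      intro j hj
      rw [getD_drop l (bi + 1) j (by simp at hj; omega)]
      exact ne_of_lt (lt_of_le_of_lt (h3 (bi + 1 + j) (by simp at hj; omega) (by omega)) hlt)
    rw [htail] at hmi
    rw [hmi]
    rw [if_neg (by simp : ¬ 2 ≤ ([((bi : Nat) : Int)] : List Int).length)]
    -- second max value is l.getD si 0
    have hsmem : l.getD si 0 ∈ l.filter (fun x => x ≠ l.getD bi 0) := by
      rw [List.mem_filter]
      exact ⟨getD_mem l si hsi, by simpa using hdup⟩
    have hsmax : PySem.List.max? (l.filter (fun x => x ≠ l.getD bi 0)) (fun x => x)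
        = some (l.getD si 0) := by
      cases h : PySem.List.max? (l.filter (fun x => x ≠ l.getD bi 0)) (fun x => x) with
      | none =>
        rw [PySem.List.max?_eq_none_iff] at h
        rw [h] at hsmem; simp at hsmem
      | some m =>
        have hm1 := PySem.List.max?_mem h
        rw [List.mem_filter] at hm1
        obtain ⟨j, hj, hjm⟩ := mem_getD l m hm1.1
        have hjb : j ≠ bi := by
          intro hh; rw [hh] at hjm
          exact (show m ≠ l.getD bi 0 by simpa using hm1.2) hjm.symm
        have hle : m ≤ l.getD si 0 := hjm ▸ h3 j hj hjb
        have hge : l.getD si 0 ≤ m := PySem.List.max?_isMax h _ hsmem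
        rw [le_antisymm hle hge]
    rw [hsmax, Option.getD_some]
    have hsidx := maxIdxs_head l si 0 (l.getD si 0) hsi rfl
      (by intro j hj
          by_cases hjb : j = bi
          · subst hjb; exact fun h => hdup h.symm
          · exact ne_of_lt (h4 j hj hjb))
    rw [zero_add] at hsidx
    rw [hsidx]
    simp

lemma inv_init (a b : Int) (rest : List Int) :
    LoopInv (a :: b :: rest) 2
      (if a ≥ b then (((0 : Int), a), ((1 : Int), b)) else (((1 : Int), b), ((0 : Int), a))) := by
  by_cases h : a ≥ b
  · refine ⟨0, 1, by omega, by omega, by simp, by omega, by simp [h], ?_, ?_, ?_, ?_⟩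
    · intro j hj
      interval_cases j
      · simp
      · simpa using h
    · intro j hj; exact absurd hj (Nat.not_lt_zero j)
    · intro j hj hjb
      interval_cases j
      · exact absurd rfl hjb
      · simp
    · intro j hj hjb
      interval_cases j
      exact absurd rfl hjb
  · refine ⟨1, 0, by omega, by omega, by simp, by omega, by simp [h], ?_, ?_, ?_, ?_⟩
    · intro j hj
      interval_cases j
      · simpa using le_of_lt (by omega : a < b)
      · simp
    · intro j hj
      interval_cases j
      simpa using (by omega : a < b)
    · intro j hj hjb
      interval_cases j
      · simp
      · exact absurd rfl hjb
    · intro j hj hjb; exact absurd hj (Nat.not_lt_zero j)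

-- ===== VERDICT (by name: the statement is the Claim_ definition above) =====
theorem find_largest_indices_spec : Claim_equal_find_largest_indices := by
  intro nums _ hpre
  unfold Spec_find_largest_indices
  unfold Pre_find_largest_indices at hpre
  match nums, hpre with
  | a :: b :: rest, _ =>
    have hlen : 2 ≤ (a :: b :: rest).length := by simp
    have hslice : PySem.List.slice (a :: b :: rest) (some 2) none = rest := by
      rw [PySem.List.slice_from (a :: b :: rest) (by omega : (0:Int) ≤ 2)]; rfl
    have hg0 : (PySem.List.pyGet? (a :: b :: rest) 0).getD 0 = a := by
      rw [show (0 : Int) = ((0 : Nat) : Int) from rfl, PySem.List.pyGet?_natCast]; rfl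
    have hg1 : (PySem.List.pyGet? (a :: b :: rest) 1).getD 0 = b := by
      rw [show (1 : Int) = ((1 : Nat) : Int) from rfl, PySem.List.pyGet?_natCast]; rfl
    have hdrop : (a :: b :: rest).drop 2 = rest := rfl
    have hinv := fold_inv (a :: b :: rest) rest 2
      (if a ≥ b then (((0 : Int), a), ((1 : Int), b)) else (((1 : Int), b), ((0 : Int), a)))
      hdrop (inv_init a b rest)
    have hA := A_char (a :: b :: rest) _ hlen hinv
    rw [hA]
    unfold find_largest_indices_alt
    rw [if_neg (by simp : ¬ (a :: b :: rest).length < 2)]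
    simp only [hg0, hg1, hslice]
    rfl
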